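-- pv_equiv track=rewrite | github.com/matiasorieta/simulacion_tp6_grupo8 | Código Python/simulacion.py | bajar_instancias_libres
-- ===== SOURCE A (Python) =====
-- def cantidad_hilos_desocupados(instancia: list[int], t: int):
--     return sum(1 for hilo in instancia if hilo <= t)
--
-- def bajar_instancias_libres(instancias: list[list[int]], cmi: int, tiempo_actual: int):
--     instancias_libres = []
--     cantidad_a_eliminar = 0
--     suma_tiempos_ociosos = 0
--
--     for instancia in instancias:
--         if cantidad_hilos_desocupados(instancia, tiempo_actual) == len(instancia):
--             instancias_libres.append(instancia)
--
--     if len(instancias_libres) > 0 and len(instancias) > cmi: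
--         cantidad_a_eliminar = len(instancias) - cmi
--         instancias_libres = instancias_libres[:cantidad_a_eliminar]
--         for instancia in instancias_libres:
--             instancias.remove(instancia)
--             suma_tiempos_ociosos += sum(t - tiempo_actual for t in instancia)
--
--     return cantidad_a_eliminar, suma_tiempos_ociosos
-- ===== SOURCE B (Python) =====
-- def bajar_instancias_libres(instancias, cmi, tiempo_actual):
--     n = len(instancias)
--     if n <= cmi:
--         return 0, 0
--     k = n - cmi
--     to_remove = set()
--     suma_tiempos_ociosos = 0
--     for i, instancia in enumerate(instancias):
--         if len(to_remove) >= k: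
--             break
--         if all(hilo <= tiempo_actual for hilo in instancia):
--             to_remove.add(i)
--             suma_tiempos_ociosos += sum(t - tiempo_actual for t in instancia)
--     if not to_remove:
--         return 0, 0
--     instancias[:] = [x for i, x in enumerate(instancias) if i not in to_remove]
--     return k, suma_tiempos_ociosos
-- ===== Notes on version B (the rewrite author's own statement) =====
-- stated objective: faster
-- what changed: One indexed pass collects the indices of the first n-cmi fully-idle instances (stopping early) and sums their idle time as it goes, then rebuilds the list in place in a single comprehension, replacing A's filter pass, slice and repeated O(n)-per-element list.remove loop.
import Mathlib
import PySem

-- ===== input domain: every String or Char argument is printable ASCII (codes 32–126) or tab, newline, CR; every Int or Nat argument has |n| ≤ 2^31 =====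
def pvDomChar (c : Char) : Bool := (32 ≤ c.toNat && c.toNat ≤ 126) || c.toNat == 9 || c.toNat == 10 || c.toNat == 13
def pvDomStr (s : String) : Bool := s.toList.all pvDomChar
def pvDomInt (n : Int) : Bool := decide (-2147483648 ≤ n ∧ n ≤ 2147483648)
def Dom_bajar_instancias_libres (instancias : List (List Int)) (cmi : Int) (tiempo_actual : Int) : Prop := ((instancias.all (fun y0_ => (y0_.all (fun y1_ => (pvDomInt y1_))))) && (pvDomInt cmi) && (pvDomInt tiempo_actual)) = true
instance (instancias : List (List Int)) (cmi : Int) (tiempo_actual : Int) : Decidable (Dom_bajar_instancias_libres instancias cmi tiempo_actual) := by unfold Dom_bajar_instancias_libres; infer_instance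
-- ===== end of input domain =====

-- B replaces A's filter pass + slice + repeated list.remove loop by ONE indexed pass that
-- collects the first n-cmi fully-idle instances (early break) while summing their idle time,
-- then rebuilds the list in one comprehension. Equivalence proved here is about the RETURN
-- value; both Pythons also mutate `instancias` in place (B via `instancias[:] = ...`).

-- ===== PORT A =====
def cantidad_hilos_desocupados (instancia : List Int) (t : Int) : Int :=
  instancia.foldl (fun a hilo => if hilo ≤ t then a + 1 else a) 0

-- the first for-loop: appends fully-idle instances in order
def pvCollectLibres (tiempo_actual : Int) : List (List Int) → List (List Int)
  | [] => []
  | instancia :: rest =>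
    if cantidad_hilos_desocupados instancia tiempo_actual = (instancia.length : Int)
    then instancia :: pvCollectLibres tiempo_actual rest
    else pvCollectLibres tiempo_actual rest

-- the removal loop; threads the mutated list through Python's list.remove (PySem.List.remove?).
-- remove? never fails here (each removed value comes from the list); on that unreachable
-- `none` the list is kept unchanged. The returned sum never reads the mutated list.
def pvRemoveLoop (tiempo_actual : Int) : List (List Int) → List (List Int) → Int → List (List Int) × Int
  | [], inst, s => (inst, s)
  | instancia :: rest, inst, s =>
    pvRemoveLoop tiempo_actual rest ((PySem.List.remove? inst instancia).getD inst)
      (s + instancia.foldl (fun a t => a + (t - tiempo_actual)) 0)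

def bajar_instancias_libres (instancias : List (List Int)) (cmi : Int) (tiempo_actual : Int) : Int × Int :=
  let instancias_libres := pvCollectLibres tiempo_actual instancias
  if 0 < instancias_libres.length ∧ cmi < (instancias.length : Int) then
    let cantidad_a_eliminar := (instancias.length : Int) - cmi
    let libres2 := PySem.List.slice instancias_libres none (some cantidad_a_eliminar)
    let r := pvRemoveLoop tiempo_actual libres2 instancias 0
    (cantidad_a_eliminar, r.2)
  else (0, 0)

-- ===== PORT B =====
-- the single indexed pass: cnt = |to_remove|, s = suma_tiempos_ociosos; breaks once cnt ≥ k
def pvAltLoop (tiempo_actual k : Int) : List (List Int) → Int → Int → Int × Int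
  | [], cnt, s => (cnt, s)
  | instancia :: rest, cnt, s =>
    if k ≤ cnt then (cnt, s)
    else if instancia.all (fun hilo => decide (hilo ≤ tiempo_actual)) then
      pvAltLoop tiempo_actual k rest (cnt + 1)
        (s + instancia.foldl (fun a t => a + (t - tiempo_actual)) 0)
    else pvAltLoop tiempo_actual k rest cnt s

def bajar_instancias_libres_alt (instancias : List (List Int)) (cmi : Int) (tiempo_actual : Int) : Int × Int :=
  if (instancias.length : Int) ≤ cmi then (0, 0)
  else
    let k := (instancias.length : Int) - cmi
    let r := pvAltLoop tiempo_actual k instancias 0 0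
    if r.1 = 0 then (0, 0) else (k, r.2)

-- ===== PRECONDITION & SPEC =====
def Spec_bajar_instancias_libres (instancias : List (List Int)) (cmi : Int) (tiempo_actual : Int) (out : Int × Int) : Prop := out = bajar_instancias_libres_alt instancias cmi tiempo_actual
instance (instancias : List (List Int)) (cmi : Int) (tiempo_actual : Int) (out : Int × Int) : Decidable (Spec_bajar_instancias_libres instancias cmi tiempo_actual out) := by unfold Spec_bajar_instancias_libres; infer_instance

-- ===== CLAIM (what is proved, stated in full; the proofs are below) =====
def Claim_equal_bajar_instancias_libres : Prop := ∀ (instancias : List (List Int)) (cmi : Int) (tiempo_actual : Int), Dom_bajar_instancias_libres instancias cmi tiempo_actual → Spec_bajar_instancias_libres instancias cmi tiempo_actual (bajar_instancias_libres instancias cmi tiempo_actual)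

-- ===== LEMMAS AND PROOFS =====

def pvSumIdle (t : Int) (x : List Int) : Int := x.foldl (fun a h => a + (h - t)) 0

def pvFree (t : Int) (x : List Int) : Bool := x.all (fun h => decide (h ≤ t))

lemma pvCount_acc (t : Int) (x : List Int) : ∀ a : Int,
    x.foldl (fun a hilo => if hilo ≤ t then a + 1 else a) a
      = a + ((x.filter (fun h => decide (h ≤ t))).length : Int) := by
  induction x with
  | nil => intro a; simp
  | cons h xs ih =>
    intro a
    by_cases hle : h ≤ t <;> simp [List.foldl, List.filter, hle, ih]
    ring

lemma pvCount_eq_len_iff (t : Int) (x : List Int) :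
    cantidad_hilos_desocupados x t = (x.length : Int) ↔ pvFree t x = true := by
  unfold cantidad_hilos_desocupados pvFree
  rw [pvCount_acc t x 0]
  have hle := List.length_filter_le (fun h => decide (h ≤ t)) x
  constructor
  · intro h
    have : (x.filter (fun h => decide (h ≤ t))).length = x.length := by omega
    rw [List.all_eq_true]
    intro a ha
    have := (List.length_filter_eq_length_iff).1 this a ha
    simpa using this
  · intro h
    have : (x.filter (fun h => decide (h ≤ t))).length = x.length := by
      rw [List.length_filter_eq_length_iff]
      intro a ha
      exact (List.all_eq_true.1 h) a ha
    omega

lemma pvCollect_eq_filter (t : Int) (l : List (List Int)) :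
    pvCollectLibres t l = l.filter (pvFree t) := by
  induction l with
  | nil => rfl
  | cons x xs ih =>
    by_cases h : pvFree t x = true
    · rw [pvCollectLibres, if_pos ((pvCount_eq_len_iff t x).2 h), List.filter_cons_of_pos h, ih]
    · rw [pvCollectLibres, if_neg (fun hc => h ((pvCount_eq_len_iff t x).1 hc)),
        List.filter_cons_of_neg (by simpa using h), ih]

lemma pvRemoveLoop_snd (t : Int) (l : List (List Int)) : ∀ inst s,
    (pvRemoveLoop t l inst s).2 = s + (l.map (pvSumIdle t)).sum := by
  induction l with
  | nil => intro inst s; simp [pvRemoveLoop]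
  | cons x xs ih =>
    intro inst s
    rw [pvRemoveLoop, ih]
    simp [pvSumIdle]
    ring

lemma pvAltLoop_spec (t k : Int) (l : List (List Int)) : ∀ cnt s : Int,
    pvAltLoop t k l cnt s
      = (cnt + (((l.filter (pvFree t)).take (k - cnt).toNat).length : Int),
         s + (((l.filter (pvFree t)).take (k - cnt).toNat).map (pvSumIdle t)).sum) := by
  induction l with
  | nil => intro cnt s; simp [pvAltLoop]
  | cons x xs ih =>
    intro cnt s
    by_cases hk : k ≤ cnt
    · have : (k - cnt).toNat = 0 := by omega
      simp [pvAltLoop, hk, this]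
    · have htn : (k - cnt).toNat = (k - (cnt + 1)).toNat + 1 := by omega
      by_cases hf : pvFree t x = true
      · rw [pvAltLoop]
        rw [if_neg hk, if_pos (by simpa [pvFree] using hf), ih,
          List.filter_cons_of_pos hf, htn, List.take_succ_cons]
        simp [pvSumIdle]
        constructor <;> ring
      · rw [pvAltLoop]
        rw [if_neg hk, if_neg (by simpa [pvFree] using hf), ih,
          List.filter_cons_of_neg (by simpa using hf)]

-- ===== VERDICT (by name: the statement is the Claim_ definition above) =====
theorem bajar_instancias_libres_spec : Claim_equal_bajar_instancias_libres := by
  intro instancias cmi t _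
  unfold Spec_bajar_instancias_libres bajar_instancias_libres bajar_instancias_libres_alt
  rw [pvCollect_eq_filter]
  simp only [pvAltLoop_spec, Int.zero_add, Int.natCast_eq_zero, List.length_take]
  split_ifs with hA hb1 hb2 hb1 hb2
  · omega
  · omega
  · rw [PySem.List.slice_to _ (show (0:Int) ≤ (instancias.length : Int) - cmi by omega), pvRemoveLoop_snd]
    simp
  · rfl
  · rfl
  · exfalso; omega
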